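-- pv_equiv track=rewrite | github.com/pypi-data/pypi-mirror-404 | packages/quantcup-backend/quantcup_backend-0.1.4.tar.gz/quantcup_backend-0.1.4/scripts/backfill/complete_pbp_backfill.py | get_missing_year_ranges
-- ===== SOURCE A (Python) =====
-- from typing import List, Tuple
--
-- MIN_YEAR = 1999
--
-- MAX_YEAR = 2024
--
-- def get_missing_year_ranges(existing_years: List[int],
--                            min_year: int = MIN_YEAR,
--                            max_year: int = MAX_YEAR) -> List[Tuple[int, int]]:
--     """Determine which year ranges need to be downloaded."""
--     all_years = set(range(min_year, max_year + 1))
--     missing_years = sorted(all_years - set(existing_years))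
--
--     if not missing_years:
--         return []
--
--     # Group missing years into ranges (max 5 years per range)
--     ranges = []
--     current_start = missing_years[0]
--     current_end = missing_years[0]
--
--     for year in missing_years[1:]:
--         if year == current_end + 1 and (year - current_start) < 5:
--             current_end = year
--         else:
--             ranges.append((current_start, current_end))
--             current_start = year
--             current_end = year
--
--     ranges.append((current_start, current_end))
--     return ranges
-- ===== SOURCE B (Python) =====
-- MIN_YEAR = 1999
-- MAX_YEAR = 2024
--
-- def get_missing_year_ranges(existing_years, min_year=MIN_YEAR, max_year=MAX_YEAR):
--     """Determine which year ranges need to be downloaded (single ordered pass, no sort)."""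
--     existing = set(existing_years)
--     ranges = []
--     open_range = None  # (start, end) of the missing range being built
--     for year in range(min_year, max_year + 1):
--         if year in existing:
--             if open_range is not None:
--                 ranges.append(open_range)
--                 open_range = None
--         elif open_range is None:
--             open_range = (year, year)
--         elif year - open_range[0] < 5:
--             open_range = (open_range[0], year)
--         else:
--             ranges.append(open_range)
--             open_range = (year, year)
--     if open_range is not None:
--         ranges.append(open_range)
--     return ranges
-- ===== Notes on version B (the rewrite author's own statement) =====
-- stated objective: simpler
-- what changed: Replaces A's set-difference + sort + separate grouping loop by a single ordered sweep over range(min_year, max_year+1) that builds the missing-year ranges directly, flushing the open range at present years; no sort and no intermediate missing-years list.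
import Mathlib
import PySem

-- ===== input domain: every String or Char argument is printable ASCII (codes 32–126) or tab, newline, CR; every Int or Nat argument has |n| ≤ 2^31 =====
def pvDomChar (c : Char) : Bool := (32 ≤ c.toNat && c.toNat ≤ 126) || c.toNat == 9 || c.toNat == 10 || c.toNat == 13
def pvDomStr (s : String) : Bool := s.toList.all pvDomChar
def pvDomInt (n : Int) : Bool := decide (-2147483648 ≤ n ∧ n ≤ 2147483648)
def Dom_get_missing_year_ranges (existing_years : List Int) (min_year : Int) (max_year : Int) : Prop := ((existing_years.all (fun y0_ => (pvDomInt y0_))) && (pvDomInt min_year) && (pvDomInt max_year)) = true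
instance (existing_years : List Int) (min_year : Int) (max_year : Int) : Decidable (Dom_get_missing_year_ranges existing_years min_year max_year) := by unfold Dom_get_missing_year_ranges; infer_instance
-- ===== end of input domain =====

-- B replaces A's set-difference + sort + grouping pass by one ordered sweep over the full
-- year span that builds the ranges directly (objective: simpler — no sort, one fused pass).

-- ===== PORT A =====
-- the body of A's grouping loop
def aStep (st : List (Int × Int) × Int × Int) (year : Int) : List (Int × Int) × Int × Int :=
  if year = st.2.2 + 1 ∧ year - st.2.1 < 5 then (st.1, st.2.1, year)
  else (st.1 ++ [(st.2.1, st.2.2)], year, year)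

def get_missing_year_ranges (existing_years : List Int) (min_year : Int) (max_year : Int) : List (Int × Int) :=
  let all_years : PySem.Set Int := PySem.Set.ofList (PySem.List.pyRange min_year (max_year + 1) 1)
  let missing_years := PySem.List.sorted (PySem.Set.diff all_years (PySem.Set.ofList existing_years)) (fun x => x) false
  match missing_years with
  | [] => []
  | h :: t =>
    let s := t.foldl aStep ([], h, h)
    s.1 ++ [(s.2.1, s.2.2)]

-- ===== PORT B =====
-- the body of B's single sweep: flush on a present year, extend/open on a missing one
def bStep (existing : PySem.Set Int) (st : List (Int × Int) × Option (Int × Int)) (year : Int) :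
    List (Int × Int) × Option (Int × Int) :=
  if PySem.Set.contains existing year then
    match st.2 with
    | some r => (st.1 ++ [r], none)
    | none => st
  else
    match st.2 with
    | none => (st.1, some (year, year))
    | some r =>
      if year - r.1 < 5 then (st.1, some (r.1, year))
      else (st.1 ++ [r], some (year, year))

def get_missing_year_ranges_alt (existing_years : List Int) (min_year : Int) (max_year : Int) : List (Int × Int) :=
  let existing : PySem.Set Int := PySem.Set.ofList existing_years
  let s := (PySem.List.pyRange min_year (max_year + 1) 1).foldl (bStep existing) ([], none)
  match s.2 with
  | none => s.1
  | some r => s.1 ++ [r]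

-- ===== PRECONDITION & SPEC =====
def Spec_get_missing_year_ranges (existing_years : List Int) (min_year : Int) (max_year : Int) (out : List (Int × Int)) : Prop := out = get_missing_year_ranges_alt existing_years min_year max_year
instance (existing_years : List Int) (min_year : Int) (max_year : Int) (out : List (Int × Int)) : Decidable (Spec_get_missing_year_ranges existing_years min_year max_year out) := by unfold Spec_get_missing_year_ranges; infer_instance

-- ===== CLAIM (what is proved, stated in full; the proofs are below) =====
def Claim_equal_get_missing_year_ranges : Prop := ∀ (existing_years : List Int) (min_year : Int) (max_year : Int), Dom_get_missing_year_ranges existing_years min_year max_year → Spec_get_missing_year_ranges existing_years min_year max_year (get_missing_year_ranges existing_years min_year max_year)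

-- ===== LEMMAS AND PROOFS =====

-- A's missing_years list is just the span filtered by absence, in increasing order.
theorem missingA (ex : List Int) (a b : Int) :
    PySem.List.sorted (PySem.Set.diff (PySem.Set.ofList (PySem.List.pyRange a b 1)) (PySem.Set.ofList ex)) (fun x : Int => x) false
      = (PySem.List.pyRange a b 1).filter (fun y => !(PySem.Set.contains (PySem.Set.ofList ex) y)) := by
  rw [PySem.Set.ofList_eq_self_of_nodup _ (PySem.List.nodup_pyRange_one a b)]
  exact PySem.List.sorted_eq_of_perm_of_pairwise_lt _ _ _ (List.Perm.refl _)
    ((PySem.List.pairwise_lt_pyRange_one a b).filter _)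

-- loop invariant relating B's sweep over the first n years of the span to A's grouping
-- fold over the missing years among them
theorem sweep_inv (exS : PySem.Set Int) (a : Int) (n : Nat) :
    ((PySem.List.pyRange a (a + n) 1).filter (fun y => !(PySem.Set.contains exS y)) = [] ∧
      (PySem.List.pyRange a (a + n) 1).foldl (bStep exS) ([], none) = ([], none)) ∨
    (∃ h t, (PySem.List.pyRange a (a + n) 1).filter (fun y => !(PySem.Set.contains exS y)) = h :: t ∧
      (t.foldl aStep ([], h, h)).2.2 < a + n ∧
      (PySem.List.pyRange a (a + n) 1).foldl (bStep exS) ([], none) =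
        (if (t.foldl aStep ([], h, h)).2.2 = a + n - 1
         then ((t.foldl aStep ([], h, h)).1, some ((t.foldl aStep ([], h, h)).2.1, (t.foldl aStep ([], h, h)).2.2))
         else ((t.foldl aStep ([], h, h)).1 ++ [((t.foldl aStep ([], h, h)).2.1, (t.foldl aStep ([], h, h)).2.2)], none))) := by
  induction n with
  | zero =>
    left
    rw [show a + ((0 : Nat) : Int) = a by omega, PySem.List.pyRange_one_eq_nil (le_refl a)]
    exact ⟨rfl, rfl⟩
  | succ n ih =>
    have hsplit : PySem.List.pyRange a (a + ((n + 1 : Nat) : Int)) 1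
        = PySem.List.pyRange a (a + n) 1 ++ [a + n] := by
      rw [show a + ((n + 1 : Nat) : Int) = (a + (n : Nat)) + 1 by push_cast; ring]
      exact PySem.List.pyRange_one_succ_right (by omega)
    rw [hsplit, List.filter_append, List.foldl_append]
    by_cases hp : (a + (n : Int)) ∈ exS
    · -- year a+n is present: missing list unchanged, B flushes any open range
      have hf : List.filter (fun y => !(PySem.Set.contains exS y)) [a + (n : Int)] = [] := by
        simp [hp]
      rcases ih with ⟨hm, hB⟩ | ⟨h, t, hm, hce, hB⟩
      · left
        refine ⟨by rw [hm, hf]; rfl, ?_⟩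
        rw [hB]; simp [bStep, hp]
      · right
        refine ⟨h, t, by rw [hm, hf, List.append_nil], by push_cast at hce ⊢; omega, ?_⟩
        rw [hB]
        have hnew : ¬ ((t.foldl aStep ([], h, h)).2.2 = a + ((n + 1 : Nat) : Int) - 1) := by
          push_cast at hce ⊢; omega
        rw [if_neg hnew]
        by_cases hopen : (t.foldl aStep ([], h, h)).2.2 = a + (n : Int) - 1
        · rw [if_pos hopen]; simp [bStep, hp]
        · rw [if_neg hopen]; simp [bStep, hp]
    · -- year a+n is missing
      have hf : List.filter (fun y => !(PySem.Set.contains exS y)) [a + (n : Int)] = [a + (n : Int)] := by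
        simp [hp]
      rcases ih with ⟨hm, hB⟩ | ⟨h, t, hm, hce, hB⟩
      · -- first missing year of the span
        right
        refine ⟨a + n, [], by rw [hm, hf]; rfl, by simp only [List.foldl_nil]; push_cast; omega, ?_⟩
        rw [hB]
        simp only [List.foldl_cons, List.foldl_nil]
        rw [if_pos (by push_cast; ring)]
        simp [bStep, hp]
      · right
        refine ⟨h, t ++ [a + (n : Int)], by rw [hm, hf]; rfl, ?_, ?_⟩ <;>
          simp only [List.foldl_append, List.foldl_cons, List.foldl_nil]
        · simp only [aStep]
          split_ifs <;> push_cast at hce ⊢ <;> omega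
        · rw [hB]
          by_cases hopen : (t.foldl aStep ([], h, h)).2.2 = a + (n : Int) - 1
        -- B has an open range ending at a+n-1; A's contiguity test matches B's cap test
          · rw [if_pos hopen]
            by_cases h5 : a + (n : Int) - (t.foldl aStep ([], h, h)).2.1 < 5
            · rw [show aStep (t.foldl aStep ([], h, h)) (a + (n : Int))
                  = ((t.foldl aStep ([], h, h)).1, (t.foldl aStep ([], h, h)).2.1, a + (n : Int)) from by
                simp only [aStep]; rw [if_pos ⟨by omega, h5⟩]]
              rw [if_pos (by push_cast; ring)]
              simp [bStep, hp, h5]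
            · rw [show aStep (t.foldl aStep ([], h, h)) (a + (n : Int))
                  = ((t.foldl aStep ([], h, h)).1 ++ [((t.foldl aStep ([], h, h)).2.1, (t.foldl aStep ([], h, h)).2.2)], a + (n : Int), a + (n : Int)) from by
                simp only [aStep]; rw [if_neg (fun hc => h5 hc.2)]]
              rw [if_pos (by push_cast; ring)]
              simp [bStep, hp, h5]
          -- B is closed; the new missing year is not contiguous, so A flushes too
          · rw [if_neg hopen]
            rw [show aStep (t.foldl aStep ([], h, h)) (a + (n : Int))
                = ((t.foldl aStep ([], h, h)).1 ++ [((t.foldl aStep ([], h, h)).2.1, (t.foldl aStep ([], h, h)).2.2)], a + (n : Int), a + (n : Int)) from by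
              simp only [aStep]; rw [if_neg (fun hc => hopen (by omega))]]
            rw [if_pos (by push_cast; ring)]
            simp [bStep, hp]

-- ===== VERDICT (by name: the statement is the Claim_ definition above) =====
theorem get_missing_year_ranges_spec : Claim_equal_get_missing_year_ranges := by
  intro ex mn mx _
  unfold Spec_get_missing_year_ranges get_missing_year_ranges get_missing_year_ranges_alt
  dsimp only
  rw [missingA]
  by_cases hle : mx + 1 ≤ mn
  · rw [PySem.List.pyRange_one_eq_nil hle]; rfl
  · obtain ⟨n, hn⟩ : ∃ n : Nat, mx + 1 = mn + (n : Int) :=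
      ⟨(mx + 1 - mn).toNat, by omega⟩
    rw [hn]
    rcases sweep_inv (PySem.Set.ofList ex) mn n with ⟨hm, hB⟩ | ⟨h, t, hm, _, hB⟩
    · rw [hm, hB]
    · rw [hm, hB]
      split_ifs <;> rfl
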